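-- pv_equiv track=rewrite | github.com/GlebCoder/py110 | lesson_1/leftover_blocks.py | get_leftovers
-- ===== SOURCE A (Python) =====
-- def get_leftovers(blocks):
--     available_blocks = blocks
--     layer = 1
--     while True:
--         blocks_for_layer = layer * layer
--         if available_blocks > blocks_for_layer:
--             available_blocks -= blocks_for_layer
--             layer += 1
--         elif available_blocks == blocks_for_layer:
--             return 0
--         else:
--             return available_blocks
-- ===== SOURCE B (Python) =====
-- def get_leftovers(blocks):
--     # Closed-form pyramid sum s(k) = 1^2 + ... + k^2, binary search for the
--     # largest complete layer instead of subtracting layer by layer.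
--     if blocks <= 0:
--         return blocks
--
--     def s(k):
--         return k * (k + 1) * (2 * k + 1) // 6
--
--     lo, hi = 0, blocks + 1   # s(lo) <= blocks < s(hi), since s(k) >= k
--     while hi - lo > 1:
--         mid = (lo + hi) // 2
--         if s(mid) <= blocks:
--             lo = mid
--         else:
--             hi = mid
--     return blocks - s(lo)
-- ===== Notes on version B (the rewrite author's own statement) =====
-- stated objective: alternative
-- what changed: Replaces the layer-by-layer subtraction loop with the closed-form sum-of-squares formula and a binary search for the largest complete layer.
import Mathlib
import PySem

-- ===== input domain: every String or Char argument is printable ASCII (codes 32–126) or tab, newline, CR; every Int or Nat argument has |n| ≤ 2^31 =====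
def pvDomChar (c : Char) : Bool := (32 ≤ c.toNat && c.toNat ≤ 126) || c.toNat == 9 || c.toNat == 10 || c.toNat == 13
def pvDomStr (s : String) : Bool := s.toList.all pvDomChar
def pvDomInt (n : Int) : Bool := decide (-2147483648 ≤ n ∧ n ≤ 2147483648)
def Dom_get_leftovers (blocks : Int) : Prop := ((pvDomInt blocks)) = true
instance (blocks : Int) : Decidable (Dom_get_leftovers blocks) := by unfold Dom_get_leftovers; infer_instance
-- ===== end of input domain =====

-- B replaces A's layer-by-layer subtraction loop with the closed-form
-- sum-of-squares formula and a binary search for the largest complete layer.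


-- ===== PORT A =====
-- A's 'while True' loop, as structural recursion on a fuel that only makes the
-- loop total: each iteration subtracts at least 1 from available_blocks, so
-- blocks.toNat + 1 iterations always suffice and the fuel-0 branch is never hit.
def get_leftovers_loop : Nat → Int → Int → Int
  | 0, avail, _ => avail
  | fuel + 1, avail, layer =>
    if avail > layer * layer then get_leftovers_loop fuel (avail - layer * layer) (layer + 1)
    else if avail = layer * layer then 0
    else avail

def get_leftovers (blocks : Int) : Int := get_leftovers_loop (blocks.toNat + 1) blocks 1

-- ===== PORT B =====
def pvS (k : Int) : Int := PySem.Int.floordiv (k * (k + 1) * (2 * k + 1)) 6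

-- B's 'while hi - lo > 1' loop, as structural recursion on a fuel that only
-- makes it total: hi - lo shrinks every iteration, so (hi - lo).toNat suffices.
def get_leftovers_bsearch : Nat → Int → Int → Int → Int
  | 0, _, lo, _ => lo
  | fuel + 1, blocks, lo, hi =>
    if hi - lo > 1 then
      let mid := PySem.Int.floordiv (lo + hi) 2
      if pvS mid ≤ blocks then get_leftovers_bsearch fuel blocks mid hi
      else get_leftovers_bsearch fuel blocks lo mid
    else lo

def get_leftovers_alt (blocks : Int) : Int :=
  if blocks ≤ 0 then blocks
  else blocks - pvS (get_leftovers_bsearch (blocks + 1).toNat blocks 0 (blocks + 1))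

-- ===== PRECONDITION & SPEC =====
def Spec_get_leftovers (blocks : Int) (out : Int) : Prop := out = get_leftovers_alt blocks
instance (blocks : Int) (out : Int) : Decidable (Spec_get_leftovers blocks out) := by unfold Spec_get_leftovers; infer_instance

-- ===== CLAIM (what is proved, stated in full; the proofs are below) =====
def Claim_equal_get_leftovers : Prop := ∀ (blocks : Int), Dom_get_leftovers blocks → Spec_get_leftovers blocks (get_leftovers blocks)

-- ===== LEMMAS AND PROOFS =====

theorem loop_succ (n : Nat) (avail layer : Int) :
    get_leftovers_loop (n + 1) avail layer =
      if avail > layer * layer then get_leftovers_loop n (avail - layer * layer) (layer + 1)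
      else if avail = layer * layer then 0
      else avail := rfl

theorem bsearch_succ (n : Nat) (blocks lo hi : Int) :
    get_leftovers_bsearch (n + 1) blocks lo hi =
      if hi - lo > 1 then
        if pvS (PySem.Int.floordiv (lo + hi) 2) ≤ blocks then
          get_leftovers_bsearch n blocks (PySem.Int.floordiv (lo + hi) 2) hi
        else get_leftovers_bsearch n blocks lo (PySem.Int.floordiv (lo + hi) 2)
      else lo := rfl

-- mathematical sum of squares 1² + … + k²
def sqSum (k : Nat) : Int :=
  match k with
  | 0 => 0
  | n + 1 => sqSum n + ((n : Int) + 1) ^ 2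

theorem six_mul_sqSum (k : Nat) :
    (k : Int) * ((k : Int) + 1) * (2 * (k : Int) + 1) = 6 * sqSum k := by
  induction k with
  | zero => simp [sqSum]
  | succ n ih =>
    show ((n : Int) + 1) * (((n : Int) + 1) + 1) * (2 * ((n : Int) + 1) + 1)
        = 6 * (sqSum n + ((n : Int) + 1) ^ 2)
    push_cast at ih ⊢
    linear_combination ih

theorem pvS_eq (k : Int) (hk : 0 ≤ k) : pvS k = sqSum k.toNat := by
  have hk' : (k.toNat : Int) = k := Int.toNat_of_nonneg hk
  have h6 := six_mul_sqSum k.toNat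
  rw [hk'] at h6
  unfold pvS
  rw [PySem.Int.floordiv_eq_ediv_of_pos (by norm_num), h6]
  omega

theorem sqSum_mono {m n : Nat} (h : m ≤ n) : sqSum m ≤ sqSum n := by
  induction n with
  | zero =>
    have : m = 0 := by omega
    simp [this]
  | succ p ih =>
    by_cases hm : m = p + 1
    · simp [hm]
    · have h2 := ih (by omega)
      have h3 := sq_nonneg ((p : Int) + 1)
      show sqSum m ≤ sqSum p + ((p : Int) + 1) ^ 2
      linarith

-- uniqueness of the bracketing layer count
theorem sqSum_uniq (b : Int) (a c : Nat)
    (ha : sqSum a ≤ b) (ha' : b < sqSum (a + 1))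
    (hc : sqSum c ≤ b) (hc' : b < sqSum (c + 1)) : a = c := by
  rcases Nat.lt_trichotomy a c with h | h | h
  · have := sqSum_mono (show a + 1 ≤ c by omega); linarith
  · exact h
  · have := sqSum_mono (show c + 1 ≤ a by omega); linarith

theorem sqSum_ge_self (k : Nat) : (k : Int) ≤ sqSum k := by
  induction k with
  | zero => simp [sqSum]
  | succ n ih =>
    show ((n : Int) + 1) ≤ sqSum n + ((n : Int) + 1) ^ 2
    nlinarith [ih]

-- A's loop computes blocks - sqSum m for the bracketing m, given enough fuel
theorem loop_spec (blocks : Int) :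
    ∀ fuel : Nat, ∀ k : Nat, (blocks - sqSum k).toNat < fuel → sqSum k ≤ blocks →
    ∃ m : Nat, get_leftovers_loop fuel (blocks - sqSum k) ((k : Int) + 1) = blocks - sqSum m ∧
      sqSum m ≤ blocks ∧ blocks < sqSum (m + 1) := by
  have step : ∀ k : Nat, sqSum (k + 1) = sqSum k + ((k : Int) + 1) ^ 2 := fun _ => rfl
  intro fuel
  induction fuel with
  | zero => intro k hk; omega
  | succ n ih =>
    intro k hk hle
    have hL : (0 : Int) < ((k : Int) + 1) * ((k : Int) + 1) := by positivity
    rw [loop_succ]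
    by_cases hr : blocks - sqSum k > ((k : Int) + 1) * ((k : Int) + 1)
    · rw [if_pos hr]
      have hk1 := step k
      have harg : blocks - sqSum k - ((k : Int) + 1) * ((k : Int) + 1) = blocks - sqSum (k + 1) := by
        rw [hk1]; ring
      have hcast : ((k : Int) + 1) + 1 = ((k + 1 : Nat) : Int) + 1 := by push_cast; ring
      rw [harg, hcast]
      exact ih (k + 1) (by omega) (by nlinarith)
    · rw [if_neg hr]
      by_cases he : blocks - sqSum k = ((k : Int) + 1) * ((k : Int) + 1)
      · rw [if_pos he]
        have h1 := step k
        refine ⟨k + 1, by nlinarith, by nlinarith, ?_⟩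
        have h2 : sqSum (k + 2) = sqSum (k + 1) + ((k : Int) + 2) ^ 2 := by
          have := step (k + 1); push_cast at this ⊢; linarith
        nlinarith
      · rw [if_neg he]
        have h1 := step k
        have hlt : blocks - sqSum k < ((k : Int) + 1) * ((k : Int) + 1) :=
          lt_of_le_of_ne (not_lt.mp hr) he
        have hsq : ((k : Int) + 1) ^ 2 = ((k : Int) + 1) * ((k : Int) + 1) := by ring
        exact ⟨k, rfl, hle, by linarith⟩

-- B's binary search returns the bracketing layer count, given enough fuel
theorem bsearch_spec (blocks : Int) :
    ∀ fuel : Nat, ∀ lo hi : Int, (hi - lo).toNat ≤ fuel → 0 ≤ lo → lo < hi →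
    sqSum lo.toNat ≤ blocks → blocks < sqSum hi.toNat →
    0 ≤ get_leftovers_bsearch fuel blocks lo hi ∧
    sqSum (get_leftovers_bsearch fuel blocks lo hi).toNat ≤ blocks ∧
    blocks < sqSum ((get_leftovers_bsearch fuel blocks lo hi).toNat + 1) := by
  intro fuel
  induction fuel with
  | zero =>
    intro lo hi hk hlo hlt _ _
    exfalso; omega
  | succ n ih =>
    intro lo hi hk hlo hlt hsl hsh
    rw [bsearch_succ]
    by_cases hg : hi - lo > 1
    · rw [if_pos hg]
      have hm := PySem.Int.floordiv_eq_ediv_of_pos (a := lo + hi) (b := 2) (by omega)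
      rw [hm]
      have hmid : lo < (lo + hi) / 2 ∧ (lo + hi) / 2 < hi := by omega
      by_cases hc : pvS ((lo + hi) / 2) ≤ blocks
      · rw [if_pos hc]
        rw [pvS_eq _ (by omega)] at hc
        exact ih ((lo + hi) / 2) hi (by omega) (by omega) (by omega) hc hsh
      · rw [if_neg hc]
        rw [pvS_eq _ (by omega)] at hc
        exact ih lo ((lo + hi) / 2) (by omega) hlo (by omega) hsl (by omega)
    · rw [if_neg hg]
      have hhi : hi.toNat = lo.toNat + 1 := by omega
      exact ⟨hlo, hsl, by rwa [hhi] at hsh⟩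

-- ===== VERDICT (by name: the statement is the Claim_ definition above) =====
theorem get_leftovers_spec : Claim_equal_get_leftovers := by
  intro blocks _
  unfold Spec_get_leftovers get_leftovers get_leftovers_alt
  by_cases hpos : blocks ≤ 0
  · rw [if_pos hpos, loop_succ]
    norm_num
    omega
  · rw [if_neg hpos]
    rw [not_le] at hpos
    -- A side
    have hA := loop_spec blocks (blocks.toNat + 1) 0 (by simp only [show sqSum 0 = 0 from rfl]; omega) (by simp only [show sqSum 0 = 0 from rfl]; omega)
    simp only [show sqSum 0 = 0 from rfl, Int.sub_zero, Nat.cast_zero, Int.zero_add] at hA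
    obtain ⟨m, hAeq, hAle, hAlt⟩ := hA
    -- B side
    have hB := bsearch_spec blocks (blocks + 1).toNat 0 (blocks + 1) (by omega)
      (le_refl _) (by omega) (by simp [show Int.toNat 0 = 0 from rfl, sqSum]; omega)
      (by
        have h1 := sqSum_ge_self (blocks + 1).toNat
        omega)
    obtain ⟨hr0, hrle, hrlt⟩ := hB
    have hmr : m = (get_leftovers_bsearch (blocks + 1).toNat blocks 0 (blocks + 1)).toNat :=
      sqSum_uniq blocks m _ hAle hAlt hrle hrlt
    rw [hAeq, hmr, pvS_eq _ hr0]
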